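-- pv_equiv track=rewrite | github.com/Jakub-Pinkowski/trading-bot | app/backtesting/metrics/per_trade_metrics.py | _get_symbol_category
-- ===== SOURCE A (Python) =====
-- def _get_symbol_category(symbol):
--     """
--     Categorize futures symbols into asset classes for margin calculation (internal use only).
--
--     Maps each symbol to its asset class category (energies, metals, indices, etc.)
--     which determines the appropriate margin ratio to use for estimating requirements.
--
--     Args:
--         symbol: Futures symbol code (e.g., 'ZS', 'CL', 'GC', 'ES')
--
--     Returns:
--         String category name: 'energies', 'metals', 'indices', 'forex', 'crypto',
--         'grains', 'softs', or 'default' if symbol not found in mapping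
--     """
--     categories = {
--         'energies': ['CL', 'NG', 'MCL', 'MNG', 'HO', 'RB'],
--         'metals': ['GC', 'SI', 'HG', 'PL', 'MGC', 'MHG', 'SIL'],
--         'indices': ['ES', 'NQ', 'YM', 'RTY', 'MES', 'MNQ', 'MYM', 'ZB'],
--         'forex': ['6E', '6J', '6B', '6A', '6C', '6S', 'M6E', 'M6J', 'M6B', 'M6A', 'M6C', 'M6S'],
--         'crypto': ['BTC', 'ETH', 'MBT', 'MET'],
--         'grains': ['ZC', 'ZW', 'ZS', 'ZL', 'XC', 'XK', 'XW', 'MZC', 'MZL', 'MZS', 'MZW'],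
--         'softs': ['SB', 'KC', 'CC']
--     }
--     for category, symbols in categories.items():
--         if symbol in symbols:
--             return category
--     return 'default'
-- ===== SOURCE B (Python) =====
-- # Sorted (symbol, category) table + hand-written binary search, instead of a linear
-- # scan over per-category lists.  No symbol appears in two categories, so the result
-- # is identical to A's first-match scan.
-- _TABLE = [
--     ('6A', 'forex'), ('6B', 'forex'), ('6C', 'forex'), ('6E', 'forex'),
--     ('6J', 'forex'), ('6S', 'forex'), ('BTC', 'crypto'), ('CC', 'softs'),
--     ('CL', 'energies'), ('ES', 'indices'), ('ETH', 'crypto'), ('GC', 'metals'),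
--     ('HG', 'metals'), ('HO', 'energies'), ('KC', 'softs'), ('M6A', 'forex'),
--     ('M6B', 'forex'), ('M6C', 'forex'), ('M6E', 'forex'), ('M6J', 'forex'),
--     ('M6S', 'forex'), ('MBT', 'crypto'), ('MCL', 'energies'), ('MES', 'indices'),
--     ('MET', 'crypto'), ('MGC', 'metals'), ('MHG', 'metals'), ('MNG', 'energies'),
--     ('MNQ', 'indices'), ('MYM', 'indices'), ('MZC', 'grains'), ('MZL', 'grains'),
--     ('MZS', 'grains'), ('MZW', 'grains'), ('NG', 'energies'), ('NQ', 'indices'),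
--     ('PL', 'metals'), ('RB', 'energies'), ('RTY', 'indices'), ('SB', 'softs'),
--     ('SI', 'metals'), ('SIL', 'metals'), ('XC', 'grains'), ('XK', 'grains'),
--     ('XW', 'grains'), ('YM', 'indices'), ('ZB', 'indices'), ('ZC', 'grains'),
--     ('ZL', 'grains'), ('ZS', 'grains'), ('ZW', 'grains'),
-- ]
--
--
-- def _get_symbol_category(symbol):
--     lo, hi = 0, len(_TABLE)
--     while lo < hi:
--         mid = (lo + hi) // 2
--         key, category = _TABLE[mid]
--         if key < symbol:
--             lo = mid + 1
--         elif symbol < key: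
--             hi = mid
--         else:
--             return category
--     return 'default'
-- ===== Notes on version B (the rewrite author's own statement) =====
-- stated objective: alternative
-- what changed: Replaces A's linear scan of per-category symbol lists by a precomputed sorted (symbol, category) table searched with a hand-written binary search; since no symbol occurs in two categories the result is identical.
import Mathlib
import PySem

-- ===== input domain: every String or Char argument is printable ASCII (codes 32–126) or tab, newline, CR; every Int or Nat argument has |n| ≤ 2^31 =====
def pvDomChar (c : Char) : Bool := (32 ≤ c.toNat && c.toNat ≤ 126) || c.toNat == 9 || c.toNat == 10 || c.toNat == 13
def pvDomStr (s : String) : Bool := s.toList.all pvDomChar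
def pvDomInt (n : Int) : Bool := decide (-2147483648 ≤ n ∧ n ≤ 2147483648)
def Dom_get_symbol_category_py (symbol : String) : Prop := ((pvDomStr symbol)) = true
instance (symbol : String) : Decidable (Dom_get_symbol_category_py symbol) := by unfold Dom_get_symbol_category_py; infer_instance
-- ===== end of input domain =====

-- B replaces A's linear scan of per-category lists by binary search in a precomputed sorted (symbol, category) table (objective: alternative).

-- ===== PORT A =====
-- the categories dict literal (insertion order) of A
def pvCats : List (String × List String) :=
  [("energies", ["CL", "NG", "MCL", "MNG", "HO", "RB"]),
   ("metals", ["GC", "SI", "HG", "PL", "MGC", "MHG", "SIL"]),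
   ("indices", ["ES", "NQ", "YM", "RTY", "MES", "MNQ", "MYM", "ZB"]),
   ("forex", ["6E", "6J", "6B", "6A", "6C", "6S", "M6E", "M6J", "M6B", "M6A", "M6C", "M6S"]),
   ("crypto", ["BTC", "ETH", "MBT", "MET"]),
   ("grains", ["ZC", "ZW", "ZS", "ZL", "XC", "XK", "XW", "MZC", "MZL", "MZS", "MZW"]),
   ("softs", ["SB", "KC", "CC"])]

-- A's loop: for category, symbols in categories.items(): if symbol in symbols: return category
def pvFindCat : List (String × List String) → String → String
  | [], _ => "default"
  | (c, syms) :: rest, s => if syms.contains s then c else pvFindCat rest s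

def get_symbol_category_py (symbol : String) : String := pvFindCat pvCats symbol

-- ===== PORT B =====
-- the precomputed sorted table literal of Source B
def pvTable : List (String × String) :=
  [("6A", "forex"), ("6B", "forex"), ("6C", "forex"), ("6E", "forex"),
   ("6J", "forex"), ("6S", "forex"), ("BTC", "crypto"), ("CC", "softs"),
   ("CL", "energies"), ("ES", "indices"), ("ETH", "crypto"), ("GC", "metals"),
   ("HG", "metals"), ("HO", "energies"), ("KC", "softs"), ("M6A", "forex"),
   ("M6B", "forex"), ("M6C", "forex"), ("M6E", "forex"), ("M6J", "forex"),
   ("M6S", "forex"), ("MBT", "crypto"), ("MCL", "energies"), ("MES", "indices"),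
   ("MET", "crypto"), ("MGC", "metals"), ("MHG", "metals"), ("MNG", "energies"),
   ("MNQ", "indices"), ("MYM", "indices"), ("MZC", "grains"), ("MZL", "grains"),
   ("MZS", "grains"), ("MZW", "grains"), ("NG", "energies"), ("NQ", "indices"),
   ("PL", "metals"), ("RB", "energies"), ("RTY", "indices"), ("SB", "softs"),
   ("SI", "metals"), ("SIL", "metals"), ("XC", "grains"), ("XK", "grains"),
   ("XW", "grains"), ("YM", "indices"), ("ZB", "indices"), ("ZC", "grains"),
   ("ZL", "grains"), ("ZS", "grains"), ("ZW", "grains")]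

-- Source B's while-loop binary search, transcribed as recursion on the shrinking range
def pvBS (s : String) (lo hi : Nat) : String :=
  if _h : lo < hi then
    let mid := (lo + hi) / 2
    let p := pvTable.getD mid ("", "")
    if p.1 < s then pvBS s (mid + 1) hi
    else if s < p.1 then pvBS s lo mid
    else p.2
  else "default"
termination_by hi - lo
decreasing_by all_goals omega

def get_symbol_category_py_alt (symbol : String) : String := pvBS symbol 0 pvTable.length

-- ===== PRECONDITION & SPEC =====
def Spec_get_symbol_category_py (symbol : String) (out : String) : Prop := out = get_symbol_category_py_alt symbol
instance (symbol : String) (out : String) : Decidable (Spec_get_symbol_category_py symbol out) := by unfold Spec_get_symbol_category_py; infer_instance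

-- ===== CLAIM (what is proved, stated in full; the proofs are below) =====
def Claim_equal_get_symbol_category_py : Prop := ∀ (symbol : String), Dom_get_symbol_category_py symbol → Spec_get_symbol_category_py symbol (get_symbol_category_py symbol)

-- ===== LEMMAS AND PROOFS =====

-- first-match scan of an association list with fallback "default"
def pvScan : List (String × String) → String → String
  | [], _ => "default"
  | (k, c) :: rest, s => if k == s then c else pvScan rest s

theorem pvScan_map_append (syms : List String) (c : String) (rest : List (String × String)) (s : String) :
    pvScan (syms.map (fun x => (x, c)) ++ rest) s = if syms.contains s then c else pvScan rest s := by
  induction syms with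
  | nil => simp
  | cons x xs ih =>
    by_cases h : x = s
    · subst h; simp [pvScan]
    · simp [pvScan, ih, Ne.symm h, beq_false_of_ne h]

theorem pvFindCat_eq_scan (cats : List (String × List String)) (s : String) :
    pvFindCat cats s = pvScan (cats.flatMap (fun p => p.2.map (fun x => (x, p.1)))) s := by
  induction cats with
  | nil => rfl
  | cons p rest ih =>
    obtain ⟨c, syms⟩ := p
    simp only [pvFindCat, List.flatMap_cons, pvScan_map_append, ih]

-- A's flattened (symbol, category) pair list
def pvFlat : List (String × String) := pvCats.flatMap (fun p => p.2.map (fun x => (x, p.1)))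

theorem pvScan_eq_of_mem (l : List (String × String)) (k v : String)
    (hnd : (l.map Prod.fst).Nodup) (hm : (k, v) ∈ l) : pvScan l k = v := by
  induction l with
  | nil => simp at hm
  | cons p rest ih =>
    obtain ⟨k', v'⟩ := p
    simp only [List.map_cons, List.nodup_cons] at hnd
    rcases List.mem_cons.mp hm with h | h
    · injection h with h1 h2
      subst h1; subst h2
      simp [pvScan]
    · have hk : k' ≠ k := by
        intro he; exact hnd.1 (he ▸ (List.mem_map.mpr ⟨(k, v), h, rfl⟩))
      simp [pvScan, beq_false_of_ne hk, ih hnd.2 h]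

theorem pvScan_not_mem (l : List (String × String)) (k : String)
    (h : k ∉ l.map Prod.fst) : pvScan l k = "default" := by
  induction l with
  | nil => rfl
  | cons p rest ih =>
    obtain ⟨k', v'⟩ := p
    simp only [List.map_cons, List.mem_cons, not_or] at h
    simp [pvScan, beq_false_of_ne (Ne.symm h.1), ih h.2]

theorem pvFlat_nodup : (pvFlat.map Prod.fst).Nodup := by decide
theorem pvTable_nodup : (pvTable.map Prod.fst).Nodup := by decide
theorem pvFlat_sub : ∀ p ∈ pvFlat, p ∈ pvTable := by decide
theorem pvTable_sub : ∀ p ∈ pvTable, p ∈ pvFlat := by decide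
theorem pvTable_sorted : pvTable.Pairwise (fun a b => a.1 < b.1) := by
  have h : pvTable.Pairwise (fun a b => a.1.toList < b.1.toList) := by decide
  exact h.imp (fun hab => String.lt_iff_toList_lt.mpr hab)

-- the two tables agree under first-match scan
theorem pvScan_flat_eq_table (s : String) : pvScan pvFlat s = pvScan pvTable s := by
  by_cases h : ∃ v, (s, v) ∈ pvFlat
  · obtain ⟨v, hv⟩ := h
    rw [pvScan_eq_of_mem pvFlat s v pvFlat_nodup hv,
        pvScan_eq_of_mem pvTable s v pvTable_nodup (pvFlat_sub _ hv)]
  · have h1 : s ∉ pvFlat.map Prod.fst := by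
      intro hm
      obtain ⟨⟨k, v⟩, hmem, hk⟩ := List.mem_map.mp hm
      simp only at hk; subst hk
      exact h ⟨v, hmem⟩
    have h2 : s ∉ pvTable.map Prod.fst := by
      intro hm
      obtain ⟨⟨k, v⟩, hmem, hk⟩ := List.mem_map.mp hm
      simp only at hk; subst hk
      exact h ⟨v, pvTable_sub _ hmem⟩
    rw [pvScan_not_mem _ _ h1, pvScan_not_mem _ _ h2]

-- strict order of keys by index
theorem pvTable_key_lt {i j : Nat} (hi : i < pvTable.length) (hj : j < pvTable.length)
    (hij : i < j) : (pvTable[i]).1 < (pvTable[j]).1 :=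
  (List.pairwise_iff_getElem.mp pvTable_sorted) i j hi hj hij

-- binary-search correctness relative to the scan, by the search's own recursion
theorem pvBS_correct (s : String) (lo hi : Nat) (hhi : hi ≤ pvTable.length)
    (hbelow : ∀ i, i < lo → ∀ h : i < pvTable.length, (pvTable[i]).1 < s)
    (habove : ∀ i, hi ≤ i → ∀ h : i < pvTable.length, s < (pvTable[i]).1) :
    pvBS s lo hi = pvScan pvTable s := by
  fun_induction pvBS s lo hi with
  | case1 lo hi h mid p hlt ih =>
    -- p.1 < s : search right half
    have hmid : mid < pvTable.length := by omega
    have hp : p = pvTable[mid] := List.getD_eq_getElem _ _ hmid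
    refine ih hhi ?_ habove
    intro i hi' hlen
    rcases Nat.lt_or_ge i mid with hc | hc
    · exact lt_trans (pvTable_key_lt hlen hmid hc) (hp ▸ hlt)
    · have : i = mid := by omega
      subst this; exact hp ▸ hlt
  | case2 lo hi h mid p hlt hgt ih =>
    -- s < p.1 : search left half
    have hmid : mid < pvTable.length := by omega
    have hp' : p = pvTable[mid] := List.getD_eq_getElem _ _ hmid
    refine ih (by omega) hbelow ?_
    intro i hi' hlen
    rcases Nat.lt_or_ge mid i with hc | hc
    · exact lt_trans (hp' ▸ hgt) (pvTable_key_lt hmid hlen hc)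
    · have : i = mid := by omega
      subst this; exact hp' ▸ hgt
  | case3 lo hi h mid p hlt hgt =>
    -- found: p.1 = s
    have hmid : mid < pvTable.length := by omega
    have hp : p = pvTable[mid] := List.getD_eq_getElem _ _ hmid
    have hkey : p.1 = s := le_antisymm (le_of_not_gt hgt) (le_of_not_gt hlt)
    have hmem : (s, p.2) ∈ pvTable := by
      rw [← hkey]; exact hp ▸ (List.getElem_mem hmid)
    exact (pvScan_eq_of_mem pvTable s p.2 pvTable_nodup hmem).symm
  | case4 lo hi h =>
    -- empty range: s is in no entry
    have hnm : s ∉ pvTable.map Prod.fst := by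
      intro hm
      obtain ⟨⟨k, v⟩, hmem, hk⟩ := List.mem_map.mp hm
      obtain ⟨i, hlen, hget⟩ := List.mem_iff_getElem.mp hmem
      rcases Nat.lt_or_ge i lo with hc | hc
      · have := hbelow i hc hlen
        rw [hget] at this; simp at hk; rw [hk] at this
        exact lt_irrefl s this
      · have := habove i (by omega) hlen
        rw [hget] at this; simp at hk; rw [hk] at this
        exact lt_irrefl s this
    exact (pvScan_not_mem _ _ hnm).symm

-- ===== VERDICT (by name: the statement is the Claim_ definition above) =====
theorem get_symbol_category_py_spec : Claim_equal_get_symbol_category_py := by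
  intro s _
  show get_symbol_category_py s = get_symbol_category_py_alt s
  rw [get_symbol_category_py, get_symbol_category_py_alt, pvFindCat_eq_scan,
      pvBS_correct s 0 pvTable.length (le_refl _) (by omega) (by omega)]
  exact pvScan_flat_eq_table s
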